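-- pv_equiv track=rewrite | github.com/sddai/myLeetCode | .ipynb_checkpoints/OD_32-checkpoint.py | taxi_fee
-- ===== SOURCE A (Python) =====
-- def taxi_fee(num):
--     s = str(num)
--     n = len(s)
--     res = 0
--     index = 0
--     for i in range(n - 1, -1, -1):
--         curr = int(s[i])
--         if curr > 4:
--             curr -= 1
--         res += curr * (9 ** (index))
--         index += 1
--     return res
-- ===== SOURCE B (Python) =====
-- def taxi_fee(num):
--     res = 0
--     for ch in str(num):
--         d = int(ch)
--         if d > 4:
--             d -= 1
--         res = res * 9 + d
--     return res
-- ===== Notes on version B (the rewrite author's own statement) =====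
-- stated objective: simpler
-- what changed: Replaces the right-to-left loop over string indices with explicit powers 9**index by a left-to-right Horner accumulation res = res*9 + digit over the characters themselves.
import Mathlib
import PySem

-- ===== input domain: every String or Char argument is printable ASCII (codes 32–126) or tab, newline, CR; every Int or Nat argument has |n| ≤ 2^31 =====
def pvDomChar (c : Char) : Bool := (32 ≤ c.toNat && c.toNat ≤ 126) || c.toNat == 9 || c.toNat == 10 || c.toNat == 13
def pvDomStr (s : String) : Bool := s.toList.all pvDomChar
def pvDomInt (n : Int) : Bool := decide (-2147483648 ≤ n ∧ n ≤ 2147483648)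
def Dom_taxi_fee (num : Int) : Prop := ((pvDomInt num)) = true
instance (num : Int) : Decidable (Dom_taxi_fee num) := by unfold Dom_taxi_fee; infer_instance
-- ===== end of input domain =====

-- B replaces A's right-to-left indexed loop with explicit powers 9**index by a
-- left-to-right Horner accumulation over the characters (objective: simpler).

-- ===== PORT A =====
-- str(num) is ported char-level via PySem.Int.toChars; int(s[i]) via
-- PySem.Int.ofChars? (getD 0 is unreachable under Pre_: all chars are digits);
-- 9 ** index via 9 ^ index.toNat (index is a nonnegative Int throughout).
def taxi_fee (num : Int) : Int :=
  let s := PySem.Int.toChars num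
  let n : Int := (s.length : Int)
  let st := (PySem.List.pyRange (n - 1) (-1) (-1)).foldl
    (fun (st : Int × Int) i =>
      let curr := (PySem.Int.ofChars? [PySem.List.pyGetD s i ' ']).getD 0
      let curr := if curr > 4 then curr - 1 else curr
      (st.1 + curr * 9 ^ st.2.toNat, st.2 + 1))
    (0, 0)
  st.1

-- ===== PORT B =====
def taxi_fee_alt (num : Int) : Int :=
  (PySem.Int.toChars num).foldl
    (fun res ch =>
      let d := (PySem.Int.ofChars? [ch]).getD 0
      let d := if d > 4 then d - 1 else d
      res * 9 + d)
    0

-- ===== PRECONDITION & SPEC =====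
-- Pre_ excludes negative num: there str(num) starts with '-' and int('-') raises
-- ValueError in both A and B.
def Pre_taxi_fee (num : Int) : Prop := 0 ≤ num
instance (num : Int) : Decidable (Pre_taxi_fee num) := by unfold Pre_taxi_fee; infer_instance
def pvWitness_taxi_fee : Int := 17

def Spec_taxi_fee (num : Int) (out : Int) : Prop := out = taxi_fee_alt num
instance (num : Int) (out : Int) : Decidable (Spec_taxi_fee num out) := by unfold Spec_taxi_fee; infer_instance

-- ===== CLAIM (what is proved, stated in full; the proofs are below) =====
def Claim_equal_taxi_fee : Prop := ∀ (num : Int), Dom_taxi_fee num → Pre_taxi_fee num → Spec_taxi_fee num (taxi_fee num)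

-- ===== LEMMAS AND PROOFS =====

-- A's countdown-indexed power loop equals B's Horner fold, for ANY character
-- list (no digit-ness needed), with general accumulator and power index.
lemma pv_loop_eq (f : Char → Int) (l : List Char) (res : Int) (idx : Nat) :
    ((PySem.List.pyRange ((l.length : Int) - 1) (-1) (-1)).foldl
      (fun (st : Int × Int) i =>
        (st.1 + f (PySem.List.pyGetD l i ' ') * 9 ^ st.2.toNat, st.2 + 1))
      (res, (idx : Int))).1
    = res + 9 ^ idx * l.foldl (fun r c => r * 9 + f c) 0 := by
  induction l using List.reverseRecOn generalizing res idx with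
  | nil =>
      rw [PySem.List.pyRange_neg_one_eq_nil (by norm_num)]
      simp
  | append_singleton l' c ih =>
      have hlen : (((l' ++ [c]).length : Int)) - 1 = (l'.length : Int) := by
        push_cast [List.length_append, List.length_singleton]; ring
      rw [hlen, PySem.List.pyRange_neg_one_cons (by omega)]
      simp only [List.foldl_cons]
      have hget : PySem.List.pyGetD (l' ++ [c]) ((l'.length : Int)) ' ' = c := by
        rw [PySem.List.pyGetD_eq_getElem (l' ++ [c]) ' ' (by omega) (by simp)]
        simp
      rw [hget]
      have hcongr :
          (PySem.List.pyRange ((l'.length : Int) - 1) (-1) (-1)).foldl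
            (fun (st : Int × Int) i =>
              (st.1 + f (PySem.List.pyGetD (l' ++ [c]) i ' ') * 9 ^ st.2.toNat, st.2 + 1))
            (res + f c * 9 ^ ((idx : Int)).toNat, (idx : Int) + 1)
          = (PySem.List.pyRange ((l'.length : Int) - 1) (-1) (-1)).foldl
            (fun (st : Int × Int) i =>
              (st.1 + f (PySem.List.pyGetD l' i ' ') * 9 ^ st.2.toNat, st.2 + 1))
            (res + f c * 9 ^ ((idx : Int)).toNat, (idx : Int) + 1) := by
        apply PySem.List.foldl_congr_mem
        intro acc i hi
        rw [PySem.List.mem_pyRange_neg_one] at hi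
        have h0 : (0 : Int) ≤ i := by omega
        have h1 : i < (l'.length : Int) := by omega
        rw [PySem.List.pyGetD_eq_getElem (l' ++ [c]) ' ' h0 (by simp; omega),
            PySem.List.pyGetD_eq_getElem l' ' ' h0 (by omega),
            List.getElem_append_left (by omega)]
      have hcast : ((idx : Int)) + 1 = (((idx + 1 : Nat)) : Int) := by push_cast; ring
      rw [hcongr, hcast, ih (res + f c * 9 ^ ((idx : Int)).toNat) (idx + 1)]
      rw [List.foldl_append]
      simp only [List.foldl_cons, List.foldl_nil, Int.toNat_natCast]
      ring

-- ===== VERDICT (by name: the statement is the Claim_ definition above) =====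
theorem taxi_fee_spec : Claim_equal_taxi_fee := by
  intro num _ _
  unfold Spec_taxi_fee taxi_fee taxi_fee_alt
  have h := pv_loop_eq
    (fun c => if (PySem.Int.ofChars? [c]).getD 0 > 4 then
        (PySem.Int.ofChars? [c]).getD 0 - 1 else (PySem.Int.ofChars? [c]).getD 0)
    (PySem.Int.toChars num) 0 0
  simp only [Nat.cast_zero, pow_zero, one_mul, zero_add] at h
  exact h
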